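-- pv_equiv track=rewrite | github.com/Ilakiya-Emily05/Pod-3- | app/models/assessment_status.py | is_valid_cefr_result_level
-- ===== SOURCE A (Python) =====
-- from enum import StrEnum
--
-- class CEFRLevel(StrEnum):
--     A1 = "A1"
--     A2 = "A2"
--     B1 = "B1"
--     B2 = "B2"
--     C1 = "C1"
--     C2 = "C2"
--
-- def is_valid_cefr_result_level(value: str) -> bool:
--     """Return whether a CEFR result value is valid.
--
--     Allows base CEFR levels (A1-C2) and promoted levels (for example, B1+).
--     """
--     base_values = {level.value for level in CEFRLevel}
--     if value in base_values:
--         return True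
--     if len(value) != 3:
--         return False
--     if not value.endswith("+"):
--         return False
--     return value[:2] in base_values
-- ===== SOURCE B (Python) =====
-- # B: precompute the full enumeration of legal values (6 base CEFR levels and
-- # their promoted '+' forms) once; validation is a single set-membership lookup.
-- _VALID = frozenset((
--     "A1", "A2", "B1", "B2", "C1", "C2",
--     "A1+", "A2+", "B1+", "B2+", "C1+", "C2+",
-- ))
--
-- def is_valid_cefr_result_level(value: str) -> bool:
--     """Return whether a CEFR result value is valid.
--
--     Allows base CEFR levels (A1-C2) and promoted levels (for example, B1+).
--     """
--     return value in _VALID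
-- ===== Notes on version B (the rewrite author's own statement) =====
-- stated objective: simpler
-- what changed: Replaced the branch-based validation (base-set test, length check, endswith check, slice membership) with a single membership test against a precomputed enumeration of all twelve legal strings.
import Mathlib
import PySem

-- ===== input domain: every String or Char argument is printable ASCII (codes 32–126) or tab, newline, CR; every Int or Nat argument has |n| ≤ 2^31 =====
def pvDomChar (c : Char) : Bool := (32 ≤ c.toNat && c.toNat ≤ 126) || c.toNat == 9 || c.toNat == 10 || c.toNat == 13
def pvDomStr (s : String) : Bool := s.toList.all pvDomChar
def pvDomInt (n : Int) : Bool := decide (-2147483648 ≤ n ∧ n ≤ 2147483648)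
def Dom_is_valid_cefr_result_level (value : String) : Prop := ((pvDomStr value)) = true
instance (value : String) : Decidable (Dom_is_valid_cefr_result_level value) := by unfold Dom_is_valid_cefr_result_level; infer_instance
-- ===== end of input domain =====

-- B replaces A's branch-based checks (length, endswith, slice membership) with one
-- membership test against a precomputed enumeration of all twelve legal strings (simpler).


-- ===== PORT A =====
-- base_values = {level.value for level in CEFRLevel}
def cefrBaseValues : List String :=
  PySem.Set.ofList ["A1", "A2", "B1", "B2", "C1", "C2"]

def is_valid_cefr_result_level (value : String) : Bool :=
  if PySem.Set.contains cefrBaseValues value then true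
  else if PySem.Str.len value ≠ 3 then false
  else if !(PySem.Str.endswith value "+") then false
  else PySem.Set.contains cefrBaseValues (PySem.Str.slice value none (some 2))

-- ===== PORT B =====
-- _VALID: the precomputed enumeration of all twelve legal strings
def cefrValidValues : List String :=
  PySem.Set.ofList ["A1", "A2", "B1", "B2", "C1", "C2",
                    "A1+", "A2+", "B1+", "B2+", "C1+", "C2+"]

def is_valid_cefr_result_level_alt (value : String) : Bool :=
  PySem.Set.contains cefrValidValues value

-- ===== PRECONDITION & SPEC =====
def Spec_is_valid_cefr_result_level (value : String) (out : Bool) : Prop := out = is_valid_cefr_result_level_alt value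
instance (value : String) (out : Bool) : Decidable (Spec_is_valid_cefr_result_level value out) := by unfold Spec_is_valid_cefr_result_level; infer_instance

-- ===== CLAIM (what is proved, stated in full; the proofs are below) =====
def Claim_equal_is_valid_cefr_result_level : Prop := ∀ (value : String), Dom_is_valid_cefr_result_level value → Spec_is_valid_cefr_result_level value (is_valid_cefr_result_level value)

-- ===== LEMMAS AND PROOFS =====


lemma cefr_branch_mem (value : String) (hlen : value.toList.length = 3)
    (hend : PySem.Str.endswith value "+" = true)
    (hsl : PySem.Str.slice value none (some 2) ∈ (["A1", "A2", "B1", "B2", "C1", "C2"] : List String)) :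
    value ∈ (["A1+", "A2+", "B1+", "B2+", "C1+", "C2+"] : List String) := by
  obtain ⟨a, b, c, htl⟩ : ∃ a b c, value.toList = [a, b, c] := by
    match h : value.toList with
    | [a, b, c] => exact ⟨a, b, c, rfl⟩
    | [] | [_] | [_, _] | _ :: _ :: _ :: _ :: _ => simp [h] at hlen
  have hc : c = '+' := by
    simp [PySem.Str.endswith_eq, htl, PySem.Chars.endswith, List.isSuffixOf,
      List.isPrefixOf] at hend
    exact hend.symm
  subst hc
  have hslt : (PySem.Str.slice value none (some 2)).toList = [a, b] := by
    simp [pysem, htl]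
  have hkey : value.toList = (PySem.Str.slice value none (some 2)).toList ++ ['+'] := by
    rw [hslt, htl]; rfl
  have hv2 := congrArg String.ofList hkey
  rw [String.ofList_toList] at hv2
  simp only [List.mem_cons, List.not_mem_nil, or_false] at hsl ⊢
  rcases hsl with h | h | h | h | h | h <;> rw [h] at hv2 <;> rw [hv2] <;> decide

lemma cefr_eq (value : String) :
    is_valid_cefr_result_level value = is_valid_cefr_result_level_alt value := by
  by_cases hv : value ∈ (["A1", "A2", "B1", "B2", "C1", "C2",
                          "A1+", "A2+", "B1+", "B2+", "C1+", "C2+"] : List String)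
  · simp only [List.mem_cons, List.not_mem_nil, or_false] at hv
    rcases hv with rfl | rfl | rfl | rfl | rfl | rfl | rfl | rfl | rfl | rfl | rfl | rfl <;> decide
  · have hB : is_valid_cefr_result_level_alt value = false := by
      simp only [is_valid_cefr_result_level_alt, cefrValidValues]
      rw [Bool.eq_false_iff]
      intro h
      exact hv (by simpa using (PySem.Set.contains_iff _ _).mp h)
    rw [hB]
    unfold is_valid_cefr_result_level
    split_ifs with h1 h2 h3
    · exfalso
      apply hv
      have hm : value ∈ (["A1", "A2", "B1", "B2", "C1", "C2"] : List String) := by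
        simpa [cefrBaseValues] using (PySem.Set.contains_iff _ _).mp h1
      simp only [List.mem_cons, List.not_mem_nil, or_false] at hm ⊢
      rcases hm with h | h | h | h | h | h
      exacts [Or.inl h, Or.inr (Or.inl h), Or.inr (Or.inr (Or.inl h)), Or.inr (Or.inr (Or.inr (Or.inl h))), Or.inr (Or.inr (Or.inr (Or.inr (Or.inl h)))), Or.inr (Or.inr (Or.inr (Or.inr (Or.inr (Or.inl h)))))]
    · rfl
    · rfl
    · rw [Bool.eq_false_iff]
      intro h4
      have hsl' : PySem.Str.slice value none (some 2) ∈ (["A1", "A2", "B1", "B2", "C1", "C2"] : List String) := by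
        simpa [cefrBaseValues] using (PySem.Set.contains_iff _ _).mp h4
      have hlen : value.toList.length = 3 := by
        have h2' : PySem.Str.len value = 3 := not_ne_iff.mp h2
        rw [PySem.Str.len_eq] at h2'
        exact_mod_cast h2'
      have hend : PySem.Str.endswith value "+" = true := by
        simpa using h3
      have hmem := cefr_branch_mem value hlen hend hsl'
      apply hv
      simp only [List.mem_cons, List.not_mem_nil, or_false] at hmem ⊢
      rcases hmem with h | h | h | h | h | h
      exacts [Or.inr (Or.inr (Or.inr (Or.inr (Or.inr (Or.inr (Or.inl h)))))), Or.inr (Or.inr (Or.inr (Or.inr (Or.inr (Or.inr (Or.inr (Or.inl h))))))), Or.inr (Or.inr (Or.inr (Or.inr (Or.inr (Or.inr (Or.inr (Or.inr (Or.inl h)))))))), Or.inr (Or.inr (Or.inr (Or.inr (Or.inr (Or.inr (Or.inr (Or.inr (Or.inr (Or.inl h))))))))), Or.inr (Or.inr (Or.inr (Or.inr (Or.inr (Or.inr (Or.inr (Or.inr (Or.inr (Or.inr (Or.inl h)))))))))), Or.inr (Or.inr (Or.inr (Or.inr (Or.inr (Or.inr (Or.inr (Or.inr (Or.inr (Or.inr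 (Or.inr (h)))))))))))]

-- ===== VERDICT (by name: the statement is the Claim_ definition above) =====
theorem is_valid_cefr_result_level_spec : Claim_equal_is_valid_cefr_result_level := by
  intro value _
  unfold Spec_is_valid_cefr_result_level
  exact cefr_eq value
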